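-- pv_equiv track=rewrite | github.com/ClaraPlateiro/Lights_Out | experimentos_stats.py | aplicar
-- ===== SOURCE A (Python) =====
-- def aplicar(tab, plan):
--     """Aplica plan (vector 0/1) al tablero y devuelve el final."""
--     n = len(tab)
--     out = [fila[:] for fila in tab]
--     for k, bit in enumerate(plan):
--         if bit:
--             i, j = divmod(k, n)
--             for di, dj in ((0,0),(1,0),(-1,0),(0,1),(0,-1)):
--                 r, c = i+di, j+dj
--                 if 0 <= r < n and 0 <= c < n:
--                     out[r][c] ^= 1
--     return out
-- ===== SOURCE B (Python) =====
-- def aplicar(tab, plan):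
--     """Aplica plan (vector 0/1) al tablero y devuelve el final."""
--     n = len(tab)
--     pressed = {divmod(k, n) for k, bit in enumerate(plan) if bit}
--     out = [fila[:] for fila in tab]
--     for i in range(n):
--         for j in range(n):
--             flips = sum((i + di, j + dj) in pressed
--                         for di, dj in ((0,0),(-1,0),(1,0),(0,-1),(0,1)))
--             out[i][j] ^= flips % 2
--     return out
-- ===== Notes on version B (the rewrite author's own statement) =====
-- stated objective: alternative
-- what changed: B decodes the plan once into a set of pressed positions and then, for every board cell, gathers the parity of pressed neighbours by set membership, instead of A's scatter that toggles the five neighbours of each pressed cell; Pre_ excludes ragged boards with a row shorter than n (A raises IndexError whenever a press touches such a row and only accidentally returns when none does, while B always raises there) and the empty board with a nonzero plan entry (both raise ZeroDivisionError).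
-- outside the precondition, e.g. on aplicar([[1], [0, 1]], [0, 0, 0, 0]): A returns [[1], [0, 1]], B raises IndexError
import Mathlib
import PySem

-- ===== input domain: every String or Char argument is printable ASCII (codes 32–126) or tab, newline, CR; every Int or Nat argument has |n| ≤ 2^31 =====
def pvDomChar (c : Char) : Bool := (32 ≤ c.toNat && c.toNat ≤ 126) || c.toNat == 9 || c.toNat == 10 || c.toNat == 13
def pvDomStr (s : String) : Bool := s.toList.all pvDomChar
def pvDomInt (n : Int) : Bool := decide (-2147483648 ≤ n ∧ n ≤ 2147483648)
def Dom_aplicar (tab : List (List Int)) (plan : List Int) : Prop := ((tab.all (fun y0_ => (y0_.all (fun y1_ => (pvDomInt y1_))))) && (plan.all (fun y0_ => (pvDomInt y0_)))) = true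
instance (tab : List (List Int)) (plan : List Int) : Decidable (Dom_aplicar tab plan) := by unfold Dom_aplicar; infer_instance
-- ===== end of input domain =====

-- B decodes the plan once into a set of pressed positions and gathers, per board cell, the parity
-- of pressed neighbours by set membership, instead of A's scatter toggling each press's neighbours.

-- ===== PORT A =====
-- out[r][c] ^= 1  (r, c already checked against A's 0..n-1 range; rows are long enough under Pre_)
def pvToggle (out : List (List Int)) (r c : Nat) : List (List Int) :=
  out.modify r (fun row => row.modify c (fun v => PySem.Int.bxor v 1))

def pvOffsets : List (Int × Int) := [(0,0),(1,0),(-1,0),(0,1),(0,-1)]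

-- the inner 'for di, dj in …' loop of A
def pvPress (n i j : Int) (out : List (List Int)) : List (List Int) :=
  pvOffsets.foldl (fun out dd =>
    if 0 ≤ i + dd.1 ∧ i + dd.1 < n ∧ 0 ≤ j + dd.2 ∧ j + dd.2 < n then
      pvToggle out (i + dd.1).toNat (j + dd.2).toNat
    else out) out

-- one iteration of A's 'for k, bit in enumerate(plan)' loop
def pvStepA (n : Int) (out : List (List Int)) (kb : Int × Int) : List (List Int) :=
  if kb.2 ≠ 0 then
    match PySem.Int.divmod? kb.1 n with
    | some ij => pvPress n ij.1 ij.2 out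
    | none => out      -- Python raises ZeroDivisionError here (tab = [], bit ≠ 0); outside Pre_aplicar
  else out

def aplicar (tab : List (List Int)) (plan : List Int) : List (List Int) :=
  let n : Int := tab.length
  let out : List (List Int) := tab.map (fun fila => fila)
  (PySem.List.enumerate plan).foldl (pvStepA n) out

-- ===== PORT B =====
-- the five neighbour positions (i+di, j+dj) of B's membership sum, in B's offset order
def pvCands (i j : Int) : List (Int × Int) := [(i,j),(i-1,j),(i+1,j),(i,j-1),(i,j+1)]

-- out[i][j] ^= b
def pvFlip (out : List (List Int)) (i j : Nat) (b : Int) : List (List Int) :=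
  out.modify i (fun row => row.modify j (fun v => PySem.Int.bxor v b))

-- one step of B's set comprehension {divmod(k, n) for k, bit in enumerate(plan) if bit}
def pvPressedStep (n : Int) (s : PySem.Set (Int × Int)) (kb : Int × Int) : PySem.Set (Int × Int) :=
  if kb.2 ≠ 0 then
    match PySem.Int.divmod? kb.1 n with
    | some ij => PySem.Set.add s ij
    | none => s      -- Python raises ZeroDivisionError here (tab = [], bit ≠ 0); outside Pre_aplicar
  else s

def pvPressed (n : Int) (plan : List Int) : PySem.Set (Int × Int) :=
  (PySem.List.enumerate plan).foldl (pvPressedStep n) PySem.Set.empty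

def aplicar_alt (tab : List (List Int)) (plan : List Int) : List (List Int) :=
  let n : Int := tab.length
  let pressed := pvPressed n plan
  let out : List (List Int) := tab.map (fun fila => fila)
  (PySem.List.pyRange 0 n 1).foldl (fun out i =>
    (PySem.List.pyRange 0 n 1).foldl (fun out j =>
      pvFlip out i.toNat j.toNat
        (((((pvCands i j).countP (fun pp => PySem.Set.contains pressed pp)) % 2 : Nat) : Int))) out) out

-- ===== PRECONDITION & SPEC =====
-- Pre_aplicar excludes (i) ragged boards with a row shorter than len(tab): A raises IndexError
-- whenever a press touches such a missing cell and returns only accidentally when none does (B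
-- always raises IndexError there), and (ii) the empty board combined with a nonzero plan entry,
-- on which both raise ZeroDivisionError in divmod.
def Pre_aplicar (tab : List (List Int)) (plan : List Int) : Prop :=
  (∀ fila ∈ tab, tab.length ≤ fila.length) ∧ (tab = [] → ∀ b ∈ plan, b = 0)
instance (tab : List (List Int)) (plan : List Int) : Decidable (Pre_aplicar tab plan) := by
  unfold Pre_aplicar; infer_instance

def pvWitness_aplicar : List (List Int) × List Int := ([[1,0],[0,1]], [1,0,0,1])

def Spec_aplicar (tab : List (List Int)) (plan : List Int) (out : List (List Int)) : Prop :=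
  out = aplicar_alt tab plan
instance (tab : List (List Int)) (plan : List Int) (out : List (List Int)) : Decidable (Spec_aplicar tab plan out) := by
  unfold Spec_aplicar; infer_instance

-- ===== CLAIM (what is proved, stated in full; the proofs are below) =====
def Claim_equal_aplicar : Prop := ∀ (tab : List (List Int)) (plan : List Int), Dom_aplicar tab plan → Pre_aplicar tab plan → Spec_aplicar tab plan (aplicar tab plan)

-- ===== LEMMAS AND PROOFS =====

-- the cell at row i, column j (none if out of range)
def pvCell (g : List (List Int)) (i j : Nat) : Option Int := g[i]?.bind (fun row => row[j]?)

-- parity of a count, as the Int that gets xored into a cell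
def pvPar (c : Nat) : Int := if c % 2 = 1 then 1 else 0

-- does candidate press pp qualify as a pressed position of plan (index in range, entry truthy)?
def pvQual (plan : List Int) (n m : Int) (pp : Int × Int) : Bool :=
  decide ((0 ≤ pp.1 ∧ 0 ≤ pp.2 ∧ pp.2 < n) ∧
    pp.1 * n + pp.2 < m ∧ PySem.List.pyGetD plan (pp.1 * n + pp.2) 0 ≠ 0)

-- does offset dd of the press decoded at (q, r) toggle cell (i, j) in A?
def pvHitDD (n q r : Int) (i j : Nat) (dd : Int × Int) : Bool :=
  decide (0 ≤ q + dd.1 ∧ q + dd.1 < n ∧ 0 ≤ r + dd.2 ∧ r + dd.2 < n ∧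
    (q + dd.1).toNat = i ∧ (r + dd.2).toNat = j)

def pvPressBit (n q r : Int) (i j : Nat) : Int := pvPar (pvOffsets.countP (pvHitDD n q r i j))

def pvStepBit (n : Int) (kb : Int × Int) (i j : Nat) : Int :=
  if kb.2 ≠ 0 then
    match PySem.Int.divmod? kb.1 n with
    | some qr => pvPressBit n qr.1 qr.2 i j
    | none => 0
  else 0

-- combined toggle bit of a whole list of enumerated plan entries
def pvLBit (n : Int) (L : List (Int × Int)) (i j : Nat) : Int :=
  match L with
  | [] => 0
  | kb :: L => PySem.Int.bxor (pvStepBit n kb i j) (pvLBit n L i j)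

-- the bit B xors into cell (i, j)
def pvBBit (plan : List Int) (n : Int) (i j : Nat) : Int :=
  if (j : Int) < n then pvPar ((pvCands (i : Int) (j : Int)).countP (pvQual plan n plan.length)) else 0

-- does candidate pp code exactly the freshly appended plan entry (index mv, value b)?
def pvDelta (n mv b : Int) (pp : Int × Int) : Bool :=
  decide ((0 ≤ pp.1 ∧ 0 ≤ pp.2 ∧ pp.2 < n) ∧ pp.1 * n + pp.2 = mv ∧ b ≠ 0)

-- ---- bxor algebra on {0,1} flips ----

lemma pvBxor_one_one (v : Int) : PySem.Int.bxor (PySem.Int.bxor v 1) 1 = v := by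
  rcases v with a | a <;> simp [PySem.Int.bxor, Nat.xor_assoc]
  split
  · next h => exfalso; have := Int.natCast_nonneg (a ^^^ 1); omega
  · omega

lemma pvZero_bxor (a : Int) : PySem.Int.bxor 0 a = a := by
  rw [PySem.Int.bxor_comm]; exact PySem.Int.bxor_zero a

lemma pvPar01 (c : Nat) : pvPar c = 0 ∨ pvPar c = 1 := by
  unfold pvPar; split <;> simp

lemma pvBxor01 (a b : Int) (ha : a = 0 ∨ a = 1) (hb : b = 0 ∨ b = 1) :
    PySem.Int.bxor a b = 0 ∨ PySem.Int.bxor a b = 1 := by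
  rcases ha with ha | ha <;> rcases hb with hb | hb <;> subst ha <;> subst hb <;>
    simp [PySem.Int.bxor_zero, pvZero_bxor, PySem.Int.bxor_self]

lemma pvBxorAssoc01 (v a b : Int) (ha : a = 0 ∨ a = 1) (hb : b = 0 ∨ b = 1) :
    PySem.Int.bxor (PySem.Int.bxor v a) b = PySem.Int.bxor v (PySem.Int.bxor a b) := by
  rcases ha with ha | ha <;> rcases hb with hb | hb <;> subst ha <;> subst hb <;>
    simp [PySem.Int.bxor_zero, pvZero_bxor, PySem.Int.bxor_self, pvBxor_one_one]

lemma pvPar_one : pvPar 1 = 1 := by simp [pvPar]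

lemma pvPar_add (x y : Nat) : pvPar (x + y) = PySem.Int.bxor (pvPar x) (pvPar y) := by
  unfold pvPar
  by_cases hx : x % 2 = 1 <;> by_cases hy : y % 2 = 1
  · have h : ¬((x + y) % 2 = 1) := by omega
    simp [h, hx, hy, PySem.Int.bxor_self]
  · have h : (x + y) % 2 = 1 := by omega
    simp [h, hx, hy, PySem.Int.bxor_zero]
  · have h : (x + y) % 2 = 1 := by omega
    simp [h, hx, hy, pvZero_bxor]
  · have h : ¬((x + y) % 2 = 1) := by omega
    simp [h, hx, hy, PySem.Int.bxor_zero]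

-- flips % 2 as an Int is pvPar of the count
lemma pvParCast (c : Nat) : ((c % 2 : Nat) : Int) = pvPar c := by
  unfold pvPar
  rcases Nat.mod_two_eq_zero_or_one c with h | h <;> simp [h]

lemma pvStepBit01 (n : Int) (kb : Int × Int) (i j : Nat) :
    pvStepBit n kb i j = 0 ∨ pvStepBit n kb i j = 1 := by
  unfold pvStepBit
  by_cases hb : kb.2 ≠ 0
  · rw [if_pos hb]
    rcases hdm : PySem.Int.divmod? kb.1 n with _ | qr
    · exact Or.inl rfl
    · exact pvPar01 _
  · rw [if_neg hb]; exact Or.inl rfl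

lemma pvLBit01 (n : Int) (L : List (Int × Int)) (i j : Nat) :
    pvLBit n L i j = 0 ∨ pvLBit n L i j = 1 := by
  induction L with
  | nil => simp [pvLBit]
  | cons kb L ih => exact pvBxor01 _ _ (pvStepBit01 n kb i j) ih

lemma pvLBit_append (n : Int) (L1 L2 : List (Int × Int)) (i j : Nat) :
    pvLBit n (L1 ++ L2) i j = PySem.Int.bxor (pvLBit n L1 i j) (pvLBit n L2 i j) := by
  induction L1 with
  | nil => simp [pvLBit, pvZero_bxor]
  | cons kb L1 ih =>
      simp only [List.cons_append, pvLBit, ih]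
      rw [pvBxorAssoc01 _ _ _ (pvLBit01 n L1 i j) (pvLBit01 n L2 i j)]

-- ---- cell effect of A's toggles ----

lemma pvCell_toggle (g : List (List Int)) (r c i j : Nat) :
    pvCell (pvToggle g r c) i j
      = (pvCell g i j).map (fun v => if r = i ∧ c = j then PySem.Int.bxor v 1 else v) := by
  unfold pvToggle pvCell
  rw [List.getElem?_modify]
  rcases hrow : g[i]? with _ | row
  · simp
  · simp only [Option.map_some, Option.bind_some]
    by_cases hr : r = i
    · subst hr
      simp only [if_pos rfl]
      rcases hv : row[j]? with _ | v
      · simp [List.getElem?_eq_none_iff.mp hv]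
      · simp only [Option.map_some]
        by_cases hc : c = j
        · subst hc; simp [hv]
        · simp [hc, hv]
    · simp only [if_neg hr]
      rcases hv : row[j]? with _ | v <;> simp [hr, hv]

lemma pvCell_pressList (n q r : Int) (L : List (Int × Int)) (g : List (List Int)) (i j : Nat) :
    pvCell (L.foldl (fun out dd =>
        if 0 ≤ q + dd.1 ∧ q + dd.1 < n ∧ 0 ≤ r + dd.2 ∧ r + dd.2 < n then
          pvToggle out (q + dd.1).toNat (r + dd.2).toNat
        else out) g) i j
      = (pvCell g i j).map (fun v => PySem.Int.bxor v (pvPar (L.countP (pvHitDD n q r i j)))) := by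
  induction L generalizing g with
  | nil =>
      simp [pvPar, PySem.Int.bxor_zero]
  | cons dd L ih =>
      rw [List.foldl_cons, List.countP_cons]
      by_cases hc : 0 ≤ q + dd.1 ∧ q + dd.1 < n ∧ 0 ≤ r + dd.2 ∧ r + dd.2 < n
      · rw [if_pos hc, ih, pvCell_toggle, Option.map_map]
        rcases hcell : pvCell g i j with _ | v
        · simp
        · simp only [Option.map_some, Function.comp]
          by_cases hh : (q + dd.1).toNat = i ∧ (r + dd.2).toNat = j
          · have hhit : pvHitDD n q r i j dd = true := by
              simp only [pvHitDD, decide_eq_true_eq]; tauto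
            rw [if_pos hh, hhit, if_pos rfl]
            have h1 : pvPar (L.countP (pvHitDD n q r i j) + 1)
                = PySem.Int.bxor 1 (pvPar (L.countP (pvHitDD n q r i j))) := by
              rw [Nat.add_comm, pvPar_add, pvPar_one]
            rw [h1]
            exact congrArg some (pvBxorAssoc01 v 1 _ (Or.inr rfl) (pvPar01 _))
          · have hhit : pvHitDD n q r i j dd = false := by
              simp only [pvHitDD, decide_eq_false_iff_not]; tauto
            rw [if_neg hh, hhit]
            simp
      · rw [if_neg hc, ih]
        have hhit : pvHitDD n q r i j dd = false := by
          simp only [pvHitDD, decide_eq_false_iff_not]; tauto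
        rw [hhit]
        simp

lemma pvCell_stepA (n : Int) (g : List (List Int)) (kb : Int × Int) (i j : Nat) :
    pvCell (pvStepA n g kb) i j
      = (pvCell g i j).map (fun v => PySem.Int.bxor v (pvStepBit n kb i j)) := by
  unfold pvStepA pvStepBit
  by_cases hb : kb.2 ≠ 0
  · rw [if_pos hb, if_pos hb]
    rcases hdm : PySem.Int.divmod? kb.1 n with _ | qr
    · cases hc0 : pvCell g i j <;> simp [hc0, PySem.Int.bxor_zero]
    · exact pvCell_pressList n qr.1 qr.2 pvOffsets g i j
  · rw [if_neg hb, if_neg hb]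
    cases hc0 : pvCell g i j <;> simp [hc0, PySem.Int.bxor_zero]

lemma pvCell_fold (n : Int) (L : List (Int × Int)) (g : List (List Int)) (i j : Nat) :
    pvCell (L.foldl (pvStepA n) g) i j
      = (pvCell g i j).map (fun v => PySem.Int.bxor v (pvLBit n L i j)) := by
  induction L generalizing g with
  | nil =>
      cases hc0 : pvCell g i j <;> simp [hc0, pvLBit, PySem.Int.bxor_zero]
  | cons kb L ih =>
      rw [List.foldl_cons, ih, pvCell_stepA, Option.map_map]
      cases hc0 : pvCell g i j
      · simp
      · simp only [hc0, Option.map_some, Function.comp, pvLBit]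
        exact congrArg some
          (pvBxorAssoc01 _ _ _ (pvStepBit01 n kb i j) (pvLBit01 n L i j))

-- ---- division uniqueness ----

lemma pvDivUnique (n a b c d : Int) (hn : 0 < n) (hb0 : 0 ≤ b) (hbn : b < n)
    (hd0 : 0 ≤ d) (hdn : d < n) (h : a * n + b = c * n + d) : a = c ∧ b = d := by
  have h2 : (a - c) * n = d - b := by linear_combination h
  have h3 : a = c := by
    rcases lt_trichotomy a c with hlt | heq | hgt
    · exfalso
      have h4 : a - c ≤ -1 := by omega
      have h5 : (a - c) * n ≤ (-1) * n := mul_le_mul_of_nonneg_right h4 (by omega)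
      rw [neg_one_mul] at h5
      linarith
    · exact heq
    · exfalso
      have h4 : 1 ≤ a - c := by omega
      have h5 : 1 * n ≤ (a - c) * n := mul_le_mul_of_nonneg_right h4 (by omega)
      rw [one_mul] at h5
      linarith
  refine ⟨h3, ?_⟩
  subst h3
  linarith

lemma pvPair (n q r a b : Int) (hn : 0 < n) (hr0 : 0 ≤ r) (hrn : r < n)
    (hb0 : 0 ≤ b) (hbn : b < n) : (a * n + b = q * n + r) ↔ (a = q ∧ b = r) := by
  constructor
  · intro h; exact pvDivUnique n a b q r hn hb0 hbn hr0 hrn h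
  · rintro ⟨h1, h2⟩; rw [h1, h2]

-- divmod(m, n) for a nonnegative index m and positive n
lemma pvDecode (mN : Nat) (n : Int) (hn : 0 < n) :
    ∃ q r : Int, PySem.Int.divmod? (mN : Int) n = some (q, r) ∧
      q * n + r = (mN : Int) ∧ 0 ≤ q ∧ 0 ≤ r ∧ r < n := by
  have hn' : n ≠ 0 := by omega
  refine ⟨PySem.Int.floordiv (mN : Int) n, PySem.Int.mod (mN : Int) n, ?_, ?_, ?_, ?_, ?_⟩
  · simp [PySem.Int.divmod?, PySem.Int.floordiv, PySem.Int.mod, hn']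
  · exact PySem.Int.floordiv_mul_add_mod _ _
  · by_contra hneg
    have h4 : PySem.Int.floordiv (mN : Int) n ≤ -1 := by omega
    have h5 : PySem.Int.floordiv (mN : Int) n * n ≤ (-1) * n :=
      mul_le_mul_of_nonneg_right h4 (by omega)
    rw [neg_one_mul] at h5
    have hqr : PySem.Int.floordiv (mN : Int) n * n + PySem.Int.mod (mN : Int) n = (mN : Int) :=
      PySem.Int.floordiv_mul_add_mod _ _
    have h6 : (0 : Int) ≤ (mN : Int) := by positivity
    have h7 : PySem.Int.mod (mN : Int) n < n := PySem.Int.mod_lt _ hn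
    linarith
  · exact PySem.Int.mod_nonneg _ hn
  · exact PySem.Int.mod_lt _ hn

-- ---- the five-candidate count matches the five-offset count ----

lemma pvCount5 (n q r : Int) (i j : Nat) (b : Int) (hn : 0 < n) (hi : (i : Int) < n)
    (hj : (j : Int) < n) (hq : 0 ≤ q) (hr0 : 0 ≤ r) (hrn : r < n) (hb : b ≠ 0) :
    (pvCands (i : Int) (j : Int)).countP (pvDelta n (q * n + r) b)
      = pvOffsets.countP (pvHitDD n q r i j) := by
  have e1 : ((0 ≤ (i:Int) ∧ 0 ≤ (j:Int) ∧ (j:Int) < n) ∧ (i:Int) * n + (j:Int) = q * n + r ∧ b ≠ 0)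
      ↔ (0 ≤ q + 0 ∧ q + 0 < n ∧ 0 ≤ r + 0 ∧ r + 0 < n ∧ (q + 0).toNat = i ∧ (r + 0).toNat = j) := by
    rw [pvPair n q r (i:Int) (j:Int) hn hr0 hrn (by omega) hj]
    constructor
    · rintro ⟨-, ⟨hA, hB⟩, -⟩; omega
    · rintro ⟨h1, h2, h3, h4, hA, hB⟩
      refine ⟨⟨by omega, by omega, hj⟩, ⟨by omega, by omega⟩, hb⟩
  have e2 : ((0 ≤ (i:Int) - 1 ∧ 0 ≤ (j:Int) ∧ (j:Int) < n) ∧ ((i:Int) - 1) * n + (j:Int) = q * n + r ∧ b ≠ 0)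
      ↔ (0 ≤ q + 1 ∧ q + 1 < n ∧ 0 ≤ r + 0 ∧ r + 0 < n ∧ (q + 1).toNat = i ∧ (r + 0).toNat = j) := by
    rw [pvPair n q r ((i:Int) - 1) (j:Int) hn hr0 hrn (by omega) hj]
    constructor
    · rintro ⟨-, ⟨hA, hB⟩, -⟩; omega
    · rintro ⟨h1, h2, h3, h4, hA, hB⟩
      refine ⟨⟨by omega, by omega, hj⟩, ⟨by omega, by omega⟩, hb⟩
  have e3 : ((0 ≤ (i:Int) + 1 ∧ 0 ≤ (j:Int) ∧ (j:Int) < n) ∧ ((i:Int) + 1) * n + (j:Int) = q * n + r ∧ b ≠ 0)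
      ↔ (0 ≤ q + -1 ∧ q + -1 < n ∧ 0 ≤ r + 0 ∧ r + 0 < n ∧ (q + -1).toNat = i ∧ (r + 0).toNat = j) := by
    rw [pvPair n q r ((i:Int) + 1) (j:Int) hn hr0 hrn (by omega) hj]
    constructor
    · rintro ⟨-, ⟨hA, hB⟩, -⟩; omega
    · rintro ⟨h1, h2, h3, h4, hA, hB⟩
      refine ⟨⟨by omega, by omega, hj⟩, ⟨by omega, by omega⟩, hb⟩
  have e4 : ((0 ≤ (i:Int) ∧ 0 ≤ (j:Int) - 1 ∧ (j:Int) - 1 < n) ∧ (i:Int) * n + ((j:Int) - 1) = q * n + r ∧ b ≠ 0)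
      ↔ (0 ≤ q + 0 ∧ q + 0 < n ∧ 0 ≤ r + 1 ∧ r + 1 < n ∧ (q + 0).toNat = i ∧ (r + 1).toNat = j) := by
    constructor
    · rintro ⟨⟨hA, hB, hC⟩, hE, -⟩
      have := pvDivUnique n (i:Int) ((j:Int) - 1) q r hn hB hC hr0 hrn hE
      omega
    · rintro ⟨h1, h2, h3, h4, hA, hB⟩
      have hA' : (i:Int) = q := by omega
      have hB' : (j:Int) - 1 = r := by omega
      refine ⟨⟨by omega, by omega, by omega⟩, by rw [hA', hB'], hb⟩
  have e5 : ((0 ≤ (i:Int) ∧ 0 ≤ (j:Int) + 1 ∧ (j:Int) + 1 < n) ∧ (i:Int) * n + ((j:Int) + 1) = q * n + r ∧ b ≠ 0)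
      ↔ (0 ≤ q + 0 ∧ q + 0 < n ∧ 0 ≤ r + -1 ∧ r + -1 < n ∧ (q + 0).toNat = i ∧ (r + -1).toNat = j) := by
    constructor
    · rintro ⟨⟨hA, hB, hC⟩, hE, -⟩
      have := pvDivUnique n (i:Int) ((j:Int) + 1) q r hn hB hC hr0 hrn hE
      omega
    · rintro ⟨h1, h2, h3, h4, hA, hB⟩
      have hA' : (i:Int) = q := by omega
      have hB' : (j:Int) + 1 = r := by omega
      refine ⟨⟨by omega, by omega, by omega⟩, by rw [hA', hB'], hb⟩
  simp only [pvCands, pvOffsets, List.countP_cons, List.countP_nil, pvDelta, pvHitDD,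
    decide_eq_true_eq]
  simp only [e1, e2, e3, e4, e5]

-- stepbit of the freshly appended plan entry = parity of B's delta count
lemma pvStep_delta (n : Int) (mN : Nat) (b : Int) (i j : Nat) (hn : 0 < n)
    (hi : (i : Int) < n) (hj : (j : Int) < n) :
    pvStepBit n ((mN : Int), b) i j
      = pvPar ((pvCands (i : Int) (j : Int)).countP (pvDelta n (mN : Int) b)) := by
  by_cases hb : b ≠ 0
  · obtain ⟨q, r, hdm, hqr, hq, hr0, hrn⟩ := pvDecode mN n hn
    unfold pvStepBit
    rw [if_pos hb, hdm]
    rw [← hqr, pvCount5 n q r i j b hn hi hj hq hr0 hrn hb]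
    rfl
  · push_neg at hb
    subst hb
    unfold pvStepBit
    simp only [ne_eq, not_true_eq_false, if_false]
    have hc : (pvCands (i : Int) (j : Int)).countP (pvDelta n (mN : Int) 0) = 0 := by
      rw [List.countP_eq_zero]
      intro pp _
      simp [pvDelta]
    rw [hc]
    rfl

-- pointwise split of the qualification predicate after appending one plan entry
lemma pvQual_split (plan : List Int) (b n : Int) (hn : 0 < n) (pp : Int × Int) :
    (pvQual (plan ++ [b]) n ((plan.length : Int) + 1) pp
        = (pvQual plan n (plan.length : Int) pp || pvDelta n (plan.length : Int) b pp))
      ∧ ¬(pvQual plan n (plan.length : Int) pp = true ∧ pvDelta n (plan.length : Int) b pp = true) := by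
  constructor
  · unfold pvQual pvDelta
    rw [← Bool.decide_or]
    apply decide_eq_decide.mpr
    by_cases hR : 0 ≤ pp.1 ∧ 0 ≤ pp.2 ∧ pp.2 < n
    · have hk0 : 0 ≤ pp.1 * n + pp.2 := add_nonneg (mul_nonneg hR.1 hn.le) hR.2.1
      obtain ⟨k, hk⟩ : ∃ k, pp.1 * n + pp.2 = k := ⟨_, rfl⟩
      rw [hk] at hk0 ⊢
      rcases lt_trichotomy k (plan.length : Int) with hlt | heq | hgt
      · have hget : PySem.List.pyGetD (plan ++ [b]) k 0 = PySem.List.pyGetD plan k 0 := by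
          rw [PySem.List.pyGetD_eq_getElem _ 0 hk0 (by simp [List.length_append]; omega),
            PySem.List.pyGetD_eq_getElem _ 0 hk0 (by exact_mod_cast hlt),
            List.getElem_append_left (by omega)]
        rw [hget]
        constructor
        · rintro ⟨h1, h2, h3⟩; exact Or.inl ⟨h1, hlt, h3⟩
        · rintro (⟨h1, h2, h3⟩ | ⟨h1, h2, h3⟩)
          · exact ⟨h1, by omega, h3⟩
          · omega
      · subst heq
        have hget : PySem.List.pyGetD (plan ++ [b]) (plan.length : Int) 0 = b := by
          rw [PySem.List.pyGetD_eq_getElem _ 0 (by positivity) (by simp [List.length_append])]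
          simp
        rw [hget]
        constructor
        · rintro ⟨h1, h2, h3⟩; exact Or.inr ⟨h1, rfl, h3⟩
        · rintro (⟨h1, h2, h3⟩ | ⟨h1, h2, h3⟩)
          · omega
          · exact ⟨h1, by omega, h3⟩
      · constructor
        · rintro ⟨h1, h2, h3⟩; omega
        · rintro (⟨h1, h2, h3⟩ | ⟨h1, h2, h3⟩) <;> omega
    · constructor
      · rintro ⟨h1, -⟩; exact absurd h1 hR
      · rintro (⟨h1, -⟩ | ⟨h1, -⟩) <;> exact absurd h1 hR
  · rintro ⟨hq, hd⟩
    simp only [pvQual, decide_eq_true_eq] at hq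
    simp only [pvDelta, decide_eq_true_eq] at hd
    have h2 := hq.2.1
    rw [hd.2.1] at h2
    exact lt_irrefl _ h2

lemma pvCountP_split {α : Type} (l : List α) (pn po pd : α → Bool)
    (h : ∀ x ∈ l, (pn x = (po x || pd x)) ∧ ¬(po x = true ∧ pd x = true)) :
    l.countP pn = l.countP po + l.countP pd := by
  induction l with
  | nil => simp
  | cons x l ih =>
      obtain ⟨hx1, hx2⟩ := h x (by simp)
      have hrest := ih (fun y hy => h y (by simp [hy]))
      cases hpo : po x <;> cases hpd : pd x
      · rw [hpo, hpd] at hx1; simp only [Bool.or_self] at hx1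
        simp [List.countP_cons, hx1, hpo, hpd, hrest]
      · rw [hpo, hpd] at hx1; simp only [Bool.false_or] at hx1
        simp [List.countP_cons, hx1, hpo, hpd, hrest]
        all_goals omega
      · rw [hpo, hpd] at hx1; simp only [Bool.or_false] at hx1
        simp [List.countP_cons, hx1, hpo, hpd, hrest]
        all_goals omega
      · exact absurd ⟨hpo, hpd⟩ hx2

-- ---- CRUX 1: A's accumulated toggle bit = the gathered parity bit ----

lemma pvCrux (plan : List Int) (n : Int) (i j : Nat) (hn : 0 < n) (hi : (i : Int) < n) :
    pvLBit n (PySem.List.enumerate plan) i j = pvBBit plan n i j := by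
  induction plan using List.reverseRecOn with
  | nil =>
      rw [PySem.List.enumerate_nil]
      have hc : (pvCands (i : Int) (j : Int)).countP (pvQual [] n ((List.length ([] : List Int) : Nat) : Int)) = 0 := by
        rw [List.countP_eq_zero]
        intro pp _
        simp [pvQual, PySem.List.pyGetD, PySem.List.pyGet?]
      unfold pvBBit
      rw [hc]
      simp [pvLBit, pvPar]
  | append_singleton plan b ih =>
      rw [PySem.List.enumerate_append, pvLBit_append, ih]
      have hsingle : PySem.List.enumerate [b] (0 + (plan.length : Int)) = [((plan.length : Int), b)] := by
        rw [PySem.List.enumerate_cons, PySem.List.enumerate_nil]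
        simp
      rw [hsingle]
      have hL1 : pvLBit n [((plan.length : Int), b)] i j = pvStepBit n ((plan.length : Int), b) i j := by
        simp [pvLBit, PySem.Int.bxor_zero]
      rw [hL1]
      by_cases hj : (j : Int) < n
      · unfold pvBBit
        rw [if_pos hj, if_pos hj]
        have hmlen : (((plan ++ [b]).length : Nat) : Int) = (plan.length : Int) + 1 := by
          simp [List.length_append]
        have hsplit : (pvCands (i : Int) (j : Int)).countP (pvQual (plan ++ [b]) n (((plan ++ [b]).length : Nat) : Int))
            = (pvCands (i : Int) (j : Int)).countP (pvQual plan n (plan.length : Int))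
              + (pvCands (i : Int) (j : Int)).countP (pvDelta n (plan.length : Int) b) := by
          rw [hmlen]
          exact pvCountP_split _ _ _ _ (fun pp _ => pvQual_split plan b n hn pp)
        rw [hsplit, pvPar_add, pvStep_delta n plan.length b i j hn hi hj]
      · unfold pvBBit
        rw [if_neg hj, if_neg hj]
        have hstep : pvStepBit n ((plan.length : Int), b) i j = 0 := by
          unfold pvStepBit
          by_cases hb : b ≠ 0
          · rw [if_pos hb]
            rcases hdm : PySem.Int.divmod? (plan.length : Int) n with _ | qr
            · rfl
            · show pvPressBit n qr.1 qr.2 i j = 0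
              have hc : pvOffsets.countP (pvHitDD n qr.1 qr.2 i j) = 0 := by
                rw [List.countP_eq_zero]
                intro dd _
                intro hdd
                simp only [pvHitDD, decide_eq_true_eq] at hdd
                omega
              unfold pvPressBit
              rw [hc]
              rfl
          · rw [if_neg hb]
        rw [hstep, PySem.Int.bxor_zero]

-- ---- CRUX 2: membership in B's pressed set is the qualification predicate ----

lemma pvMemPressed (plan : List Int) (n : Int) (hn : 0 < n) (pp : Int × Int) :
    PySem.Set.contains (pvPressed n plan) pp = pvQual plan n (plan.length : Int) pp := by
  rw [Bool.eq_iff_iff, PySem.Set.contains_iff]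
  induction plan using List.reverseRecOn with
  | nil =>
      constructor
      · intro h; exact absurd h (List.not_mem_nil)
      · intro h
        simp [pvQual, PySem.List.pyGetD, PySem.List.pyGet?] at h
  | append_singleton plan b ih =>
      have hstep : pvPressed n (plan ++ [b])
          = pvPressedStep n (pvPressed n plan) ((plan.length : Int), b) := by
        unfold pvPressed
        rw [PySem.List.enumerate_append]
        have hsingle : PySem.List.enumerate [b] (0 + (plan.length : Int)) = [((plan.length : Int), b)] := by
          rw [PySem.List.enumerate_cons, PySem.List.enumerate_nil]
          norm_num
        rw [hsingle, List.foldl_append, List.foldl_cons, List.foldl_nil]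
      have hmlen : (((plan ++ [b]).length : Nat) : Int) = (plan.length : Int) + 1 := by
        simp [List.length_append]
      rw [hstep]
      by_cases hb : b ≠ 0
      · obtain ⟨q, r, hdm, hqr, hq0, hr0, hrn⟩ := pvDecode plan.length n hn
        have hred : pvPressedStep n (pvPressed n plan) ((plan.length : Int), b)
            = PySem.Set.add (pvPressed n plan) (q, r) := by
          simp [pvPressedStep, hb, hdm]
        rw [hred, PySem.Set.mem_add]
        have hdelta : pp = (q, r) ↔ pvDelta n (plan.length : Int) b pp = true := by
          constructor
          · intro h
            subst h
            simp only [pvDelta, decide_eq_true_eq]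
            exact ⟨⟨hq0, hr0, hrn⟩, hqr, hb⟩
          · intro h
            simp only [pvDelta, decide_eq_true_eq] at h
            obtain ⟨⟨h1, h2, h3⟩, h4, -⟩ := h
            have := pvDivUnique n pp.1 pp.2 q r hn h2 h3 hr0 hrn (by rw [h4, hqr])
            obtain ⟨ha, hb'⟩ := this
            exact Prod.ext ha hb'
        rw [hmlen, (pvQual_split plan b n hn pp).1, Bool.or_eq_true, ← ih, hdelta]
      · have hred : pvPressedStep n (pvPressed n plan) ((plan.length : Int), b)
            = pvPressed n plan := by
          simp [pvPressedStep, hb]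
        rw [hred]
        push_neg at hb
        subst hb
        rw [hmlen, (pvQual_split plan 0 n hn pp).1, Bool.or_eq_true, ← ih]
        have hd : pvDelta n (plan.length : Int) 0 pp = false := by
          simp [pvDelta]
        rw [hd]
        simp

-- ---- cell effect of B's gather writes ----

lemma pvCell_flip (g : List (List Int)) (r c i j : Nat) (b : Int) :
    pvCell (pvFlip g r c b) i j
      = (pvCell g i j).map (fun v => if r = i ∧ c = j then PySem.Int.bxor v b else v) := by
  unfold pvFlip pvCell
  rw [List.getElem?_modify]
  rcases hrow : g[i]? with _ | row
  · simp
  · simp only [Option.map_some, Option.bind_some]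
    by_cases hr : r = i
    · subst hr
      simp only [if_pos rfl]
      rcases hv : row[j]? with _ | v
      · simp [List.getElem?_eq_none_iff.mp hv]
      · simp only [Option.map_some]
        by_cases hc : c = j
        · subst hc; simp [hv]
        · simp [hc, hv]
    · simp only [if_neg hr]
      rcases hv : row[j]? with _ | v <;> simp [hr, hv]

-- combined xor bit, at cell (i, j), of a list of (row, col, bit) writes
def pvFlipsBit (ops : List (Nat × Nat × Int)) (i j : Nat) : Int :=
  match ops with
  | [] => 0
  | o :: ops => PySem.Int.bxor (if o.1 = i ∧ o.2.1 = j then o.2.2 else 0) (pvFlipsBit ops i j)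

def pv01 (ops : List (Nat × Nat × Int)) : Prop := ∀ o ∈ ops, o.2.2 = 0 ∨ o.2.2 = 1

lemma pvFlipsBit01 (ops : List (Nat × Nat × Int)) (i j : Nat) (h : pv01 ops) :
    pvFlipsBit ops i j = 0 ∨ pvFlipsBit ops i j = 1 := by
  induction ops with
  | nil => exact Or.inl rfl
  | cons o ops ih =>
      refine pvBxor01 _ _ ?_ (ih (fun x hx => h x (List.mem_cons_of_mem o hx)))
      split
      · exact h o (by simp)
      · exact Or.inl rfl

lemma pvFlipsBit_append (ops1 ops2 : List (Nat × Nat × Int)) (i j : Nat)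
    (h1 : pv01 ops1) (h2 : pv01 ops2) :
    pvFlipsBit (ops1 ++ ops2) i j
      = PySem.Int.bxor (pvFlipsBit ops1 i j) (pvFlipsBit ops2 i j) := by
  induction ops1 with
  | nil => simp [pvFlipsBit, pvZero_bxor]
  | cons o ops1 ih =>
      simp only [List.cons_append, pvFlipsBit]
      rw [ih (fun x hx => h1 x (List.mem_cons_of_mem o hx))]
      rw [pvBxorAssoc01 _ _ _ (pvFlipsBit01 _ i j (fun x hx => h1 x (List.mem_cons_of_mem o hx)))
        (pvFlipsBit01 _ i j h2)]

lemma pvCell_flipFold (ops : List (Nat × Nat × Int)) (g : List (List Int)) (i j : Nat)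
    (h01 : pv01 ops) :
    pvCell (ops.foldl (fun g o => pvFlip g o.1 o.2.1 o.2.2) g) i j
      = (pvCell g i j).map (fun v => PySem.Int.bxor v (pvFlipsBit ops i j)) := by
  induction ops generalizing g with
  | nil =>
      cases hc0 : pvCell g i j <;> simp [hc0, pvFlipsBit, PySem.Int.bxor_zero]
  | cons o ops ih =>
      rw [List.foldl_cons, ih _ (fun x hx => h01 x (List.mem_cons_of_mem o hx)), pvCell_flip, Option.map_map]
      cases hc0 : pvCell g i j with
      | none => simp
      | some v =>
        simp only [hc0, Option.map_some, Function.comp, pvFlipsBit]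
        refine congrArg some ?_
        have hb : (if o.1 = i ∧ o.2.1 = j then o.2.2 else 0) = 0 ∨
            (if o.1 = i ∧ o.2.1 = j then o.2.2 else 0) = 1 := by
          split
          · exact h01 o (by simp)
          · exact Or.inl rfl
        by_cases hc : o.1 = i ∧ o.2.1 = j
        · rw [if_pos hc, if_pos hc]
          exact pvBxorAssoc01 v _ _ (by rw [if_pos hc] at hb; exact hb)
            (pvFlipsBit01 _ i j (fun x hx => h01 x (List.mem_cons_of_mem o hx)))
        · rw [if_neg hc, if_neg hc, pvZero_bxor]

-- collapse one row's writes of the gather to its (at most one) write at column j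
lemma pvRowBit (a : Int) (ha : 0 ≤ a) (bit : Int → Int) (i j : Nat) :
    ∀ L : List Int, (∀ c ∈ L, 0 ≤ c) → L.Nodup →
    pvFlipsBit (L.map (fun c => (a.toNat, c.toNat, bit c))) i j
      = if a.toNat = i ∧ (j : Int) ∈ L then bit (j : Int) else 0 := by
  intro L
  induction L with
  | nil => intro _ _; simp [pvFlipsBit]
  | cons c L ih =>
      intro hL hnd
      have hc0 : 0 ≤ c := hL c (by simp)
      have htl := ih (fun x hx => hL x (List.mem_cons_of_mem c hx)) (List.nodup_cons.mp hnd).2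
      rw [List.map_cons]
      show PySem.Int.bxor (if a.toNat = i ∧ c.toNat = j then bit c else 0)
          (pvFlipsBit (L.map (fun c => (a.toNat, c.toNat, bit c))) i j) = _
      rw [htl]
      by_cases hcj : c = (j : Int)
      · have hnotin : (j : Int) ∉ L := by
          rw [← hcj]; exact (List.nodup_cons.mp hnd).1
        have htail0 : (if a.toNat = i ∧ (j : Int) ∈ L then bit (j : Int) else 0) = 0 :=
          if_neg (fun h => hnotin h.2)
        rw [htail0, PySem.Int.bxor_zero]
        have hcn : c.toNat = j := by omega
        by_cases hai : a.toNat = i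
        · rw [if_pos ⟨hai, hcn⟩, if_pos ⟨hai, by rw [hcj]; exact List.mem_cons_self⟩, hcj]
        · rw [if_neg (fun h => hai h.1), if_neg (fun h => hai h.1)]
      · have hcn : ¬(c.toNat = j) := by omega
        rw [if_neg (fun h => hcn h.2), pvZero_bxor]
        by_cases hmem : (j : Int) ∈ L
        · by_cases hai : a.toNat = i
          · rw [if_pos ⟨hai, hmem⟩, if_pos ⟨hai, List.mem_cons_of_mem c hmem⟩]
          · rw [if_neg (fun h => hai h.1), if_neg (fun h => hai h.1)]
        · rw [if_neg (fun h => hmem h.2)]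
          have hno : ¬((j : Int) ∈ c :: L) := by
            simp only [List.mem_cons, not_or]
            exact ⟨fun h => hcj h.symm, hmem⟩
          rw [if_neg (fun h => hno h.2)]

-- collapse the whole grid of gather writes to the single write at cell (i, j)
lemma pvFlatBit (L : List Int) (hL : ∀ c ∈ L, 0 ≤ c) (hLnd : L.Nodup) (bit : Int → Int → Int)
    (hbit : ∀ a c, bit a c = 0 ∨ bit a c = 1) (i j : Nat) :
    ∀ R : List Int, (∀ a ∈ R, 0 ≤ a) → R.Nodup →
    pvFlipsBit (R.flatMap (fun a => L.map (fun c => (a.toNat, c.toNat, bit a c)))) i j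
      = if (i : Int) ∈ R ∧ (j : Int) ∈ L then bit (i : Int) (j : Int) else 0 := by
  intro R
  induction R with
  | nil => intro _ _; simp [pvFlipsBit]
  | cons a R ih =>
      intro hR hRnd
      have ha0 : 0 ≤ a := hR a (by simp)
      have h01map : pv01 (L.map (fun c => (a.toNat, c.toNat, bit a c))) := by
        intro o ho
        obtain ⟨c, -, rfl⟩ := List.mem_map.mp ho
        exact hbit a c
      have h01flat : pv01 (R.flatMap (fun a => L.map (fun c => (a.toNat, c.toNat, bit a c)))) := by
        intro o ho
        obtain ⟨a', -, ho'⟩ := List.mem_flatMap.mp ho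
        obtain ⟨c, -, rfl⟩ := List.mem_map.mp ho'
        exact hbit a' c
      have htl := ih (fun x hx => hR x (List.mem_cons_of_mem a hx)) (List.nodup_cons.mp hRnd).2
      rw [List.flatMap_cons, pvFlipsBit_append _ _ i j h01map h01flat, htl,
        pvRowBit a ha0 (bit a) i j L hL hLnd]
      by_cases hai : a = (i : Int)
      · have hnotin : (i : Int) ∉ R := by
          rw [← hai]; exact (List.nodup_cons.mp hRnd).1
        have htail0 : (if (i : Int) ∈ R ∧ (j : Int) ∈ L then bit (i : Int) (j : Int) else 0) = 0 :=
          if_neg (fun h => hnotin h.1)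
        rw [htail0, PySem.Int.bxor_zero]
        have han : a.toNat = i := by omega
        by_cases hjm : (j : Int) ∈ L
        · rw [if_pos ⟨han, hjm⟩, if_pos ⟨by rw [hai]; exact List.mem_cons_self, hjm⟩, hai]
        · rw [if_neg (fun h => hjm h.2), if_neg (fun h => hjm h.2)]
      · have han : ¬(a.toNat = i) := by omega
        rw [if_neg (fun h => han h.1), pvZero_bxor]
        by_cases hR' : (i : Int) ∈ R
        · by_cases hjm : (j : Int) ∈ L
          · rw [if_pos ⟨hR', hjm⟩, if_pos ⟨List.mem_cons_of_mem a hR', hjm⟩]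
          · rw [if_neg (fun h => hjm h.2), if_neg (fun h => hjm h.2)]
        · rw [if_neg (fun h => hR' h.1)]
          have hno : ¬((i : Int) ∈ a :: R) := by
            simp only [List.mem_cons, not_or]
            exact ⟨fun h => hai h.symm, hR'⟩
          rw [if_neg (fun h => hno h.1)]

-- fold of per-row write blocks = fold of the flattened write list
lemma pvFoldFlat (F : Int → List (Nat × Nat × Int)) (R : List Int) (g : List (List Int)) :
    R.foldl (fun out a => (F a).foldl (fun g o => pvFlip g o.1 o.2.1 o.2.2) out) g
      = (R.flatMap F).foldl (fun g o => pvFlip g o.1 o.2.1 o.2.2) g := by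
  induction R generalizing g with
  | nil => rfl
  | cons a R ih => rw [List.foldl_cons, List.flatMap_cons, List.foldl_append, ih]

-- the Int B xors into cell (a, c): membership count of the five candidates, mod 2
def pvBitB (tab : List (List Int)) (plan : List Int) (a c : Int) : Int :=
  ((((pvCands a c).countP
    (fun pp => PySem.Set.contains (pvPressed (tab.length : Int) plan) pp)) % 2 : Nat) : Int)

-- B's double range loop, reshaped as one flat list of cell writes
lemma pvAltEq (tab : List (List Int)) (plan : List Int) :
    aplicar_alt tab plan
      = ((PySem.List.pyRange 0 (tab.length : Int) 1).flatMap (fun a =>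
          (PySem.List.pyRange 0 (tab.length : Int) 1).map (fun c =>
            (a.toNat, c.toNat, pvBitB tab plan a c)))).foldl
          (fun g o => pvFlip g o.1 o.2.1 o.2.2) (tab.map (fun fila => fila)) := by
  show (PySem.List.pyRange 0 (tab.length : Int) 1).foldl
    (fun out a => (PySem.List.pyRange 0 (tab.length : Int) 1).foldl (fun out c =>
      pvFlip out a.toNat c.toNat (pvBitB tab plan a c)) out) (tab.map (fun fila => fila)) = _
  have hinner : (fun (out : List (List Int)) (a : Int) =>
        (PySem.List.pyRange 0 (tab.length : Int) 1).foldl (fun out c =>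
          pvFlip out a.toNat c.toNat (pvBitB tab plan a c)) out)
      = (fun (out : List (List Int)) (a : Int) =>
        ((PySem.List.pyRange 0 (tab.length : Int) 1).map (fun c =>
          (a.toNat, c.toNat, pvBitB tab plan a c))).foldl
          (fun g o => pvFlip g o.1 o.2.1 o.2.2) out) := by
    funext out a
    rw [List.foldl_map]
  rw [hinner, pvFoldFlat]

-- the bit of B's write list at cell (i, j)
lemma pvCell_alt (tab : List (List Int)) (plan : List Int) (i j : Nat)
    (hi : i < tab.length) :
    pvCell (aplicar_alt tab plan) i j
      = (pvCell tab i j).map (fun v => PySem.Int.bxor v (pvBBit plan (tab.length : Int) i j)) := by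
  have hn : 0 < (tab.length : Int) := by exact_mod_cast Nat.lt_of_le_of_lt (Nat.zero_le i) hi
  have hmemR : ∀ x ∈ PySem.List.pyRange 0 (tab.length : Int) 1, 0 ≤ x := by
    intro x hx
    exact ((PySem.List.mem_pyRange_one).mp hx).1
  have hcast : ∀ a c : Int, pvBitB tab plan a c
      = pvPar ((pvCands a c).countP (pvQual plan (tab.length : Int) (plan.length : Int))) := by
    intro a c
    unfold pvBitB
    rw [pvParCast]
    congr 1
    apply List.countP_congr
    intro pp _
    rw [pvMemPressed plan (tab.length : Int) hn pp]
  rw [pvAltEq, pvCell_flipFold _ _ i j (by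
    intro o ho
    obtain ⟨a, -, ho'⟩ := List.mem_flatMap.mp ho
    obtain ⟨c, -, rfl⟩ := List.mem_map.mp ho'
    rw [hcast]
    exact pvPar01 _)]
  have hflat := pvFlatBit (PySem.List.pyRange 0 (tab.length : Int) 1)
    hmemR (PySem.List.nodup_pyRange_one 0 (tab.length : Int))
    (pvBitB tab plan) (fun a c => by rw [hcast]; exact pvPar01 _) i j
    (PySem.List.pyRange 0 (tab.length : Int) 1) hmemR (PySem.List.nodup_pyRange_one 0 (tab.length : Int))
  rw [hflat]
  have hiR : (i : Int) ∈ PySem.List.pyRange 0 (tab.length : Int) 1 := by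
    rw [PySem.List.mem_pyRange_one]
    constructor
    · positivity
    · exact_mod_cast hi
  have hbb : (if (i : Int) ∈ PySem.List.pyRange 0 (tab.length : Int) 1 ∧
        (j : Int) ∈ PySem.List.pyRange 0 (tab.length : Int) 1 then
      pvBitB tab plan (i : Int) (j : Int)
    else 0) = pvBBit plan (tab.length : Int) i j := by
    unfold pvBBit
    by_cases hj : (j : Int) < (tab.length : Int)
    · rw [if_pos ⟨hiR, by rw [PySem.List.mem_pyRange_one]; exact ⟨by positivity, hj⟩⟩, if_pos hj,
        hcast]
    · rw [if_neg (fun h => hj ((PySem.List.mem_pyRange_one).mp h.2).2), if_neg hj]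
  rw [hbb, List.map_id']

-- ---- lengths ----

lemma pvLen_toggle (g : List (List Int)) (r c : Nat) : (pvToggle g r c).length = g.length := by
  unfold pvToggle; exact List.length_modify ..

lemma pvLen_pressList (n q r : Int) (L : List (Int × Int)) (g : List (List Int)) :
    (L.foldl (fun out dd =>
        if 0 ≤ q + dd.1 ∧ q + dd.1 < n ∧ 0 ≤ r + dd.2 ∧ r + dd.2 < n then
          pvToggle out (q + dd.1).toNat (r + dd.2).toNat
        else out) g).length = g.length := by
  induction L generalizing g with
  | nil => rfl
  | cons dd L ih =>
      rw [List.foldl_cons, ih]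
      split
      · exact pvLen_toggle ..
      · rfl

lemma pvLen_stepA (n : Int) (g : List (List Int)) (kb : Int × Int) :
    (pvStepA n g kb).length = g.length := by
  unfold pvStepA
  by_cases hb : kb.2 ≠ 0
  · rw [if_pos hb]
    rcases hdm : PySem.Int.divmod? kb.1 n with _ | qr
    · rfl
    · exact pvLen_pressList n qr.1 qr.2 pvOffsets g
  · rw [if_neg hb]

lemma pvLen_fold (n : Int) (L : List (Int × Int)) (g : List (List Int)) :
    (L.foldl (pvStepA n) g).length = g.length := by
  induction L generalizing g with
  | nil => rfl
  | cons kb L ih => rw [List.foldl_cons, ih, pvLen_stepA]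

lemma pvLenA (tab : List (List Int)) (plan : List Int) :
    (aplicar tab plan).length = tab.length := by
  show ((PySem.List.enumerate plan).foldl (pvStepA (tab.length : Int)) (tab.map fun fila => fila)).length = tab.length
  rw [pvLen_fold, List.map_id']

lemma pvLen_flip (g : List (List Int)) (r c : Nat) (b : Int) : (pvFlip g r c b).length = g.length := by
  unfold pvFlip; exact List.length_modify ..

lemma pvLen_flipFold (ops : List (Nat × Nat × Int)) (g : List (List Int)) :
    (ops.foldl (fun g o => pvFlip g o.1 o.2.1 o.2.2) g).length = g.length := by
  induction ops generalizing g with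
  | nil => rfl
  | cons o ops ih => rw [List.foldl_cons, ih, pvLen_flip]

lemma pvLenB (tab : List (List Int)) (plan : List Int) :
    (aplicar_alt tab plan).length = tab.length := by
  rw [pvAltEq, pvLen_flipFold, List.map_id']

-- the bit A xors into cell (i, j) of the copy
lemma pvCell_aplicar (tab : List (List Int)) (plan : List Int) (i j : Nat) :
    pvCell (aplicar tab plan) i j
      = (pvCell tab i j).map
          (fun v => PySem.Int.bxor v (pvLBit (tab.length : Int) (PySem.List.enumerate plan) i j)) := by
  show pvCell ((PySem.List.enumerate plan).foldl (pvStepA (tab.length : Int)) (tab.map fun fila => fila)) i j = _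
  rw [List.map_id']
  exact pvCell_fold _ _ _ _ _

-- ---- assembly ----

theorem pvMain (tab : List (List Int)) (plan : List Int) :
    aplicar tab plan = aplicar_alt tab plan := by
  apply List.ext_getElem?
  intro i
  by_cases hi : i < tab.length
  · have hn : 0 < (tab.length : Int) := by exact_mod_cast Nat.lt_of_le_of_lt (Nat.zero_le i) hi
    have hiI : (i : Int) < (tab.length : Int) := by exact_mod_cast hi
    have hiA : i < (aplicar tab plan).length := by rw [pvLenA]; exact hi
    have hiB : i < (aplicar_alt tab plan).length := by rw [pvLenB]; exact hi
    rw [List.getElem?_eq_getElem hiA, List.getElem?_eq_getElem hiB]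
    congr 1
    apply List.ext_getElem?
    intro j
    have hcA : ((aplicar tab plan)[i]'hiA)[j]? = pvCell (aplicar tab plan) i j := by
      unfold pvCell
      rw [List.getElem?_eq_getElem hiA]
      rfl
    have hcB : ((aplicar_alt tab plan)[i]'hiB)[j]? = pvCell (aplicar_alt tab plan) i j := by
      unfold pvCell
      rw [List.getElem?_eq_getElem hiB]
      rfl
    rw [hcA, hcB, pvCell_aplicar, pvCell_alt tab plan i j hi,
      pvCrux plan (tab.length : Int) i j hn hiI]
  · rw [List.getElem?_eq_none (by rw [pvLenA]; omega), List.getElem?_eq_none (by rw [pvLenB]; omega)]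

-- ===== VERDICT (by name: the statement is the Claim_ definition above) =====
theorem aplicar_spec : Claim_equal_aplicar := by
  intro tab plan _hdom _hpre
  exact pvMain tab plan
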